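-- pv_equiv track=rewrite | github.com/ldobbelsteen/rubik | logic.py | list_corners
-- ===== SOURCE A (Python) =====
-- def cubie_type(n: int, x: int, y: int, z: int):
--     """Determine the type of a cubie by its coordinates. 0 = corner, 1 = center,
--     2 = edge and -1 = internal."""
--     if (x == 0 or x == n - 1) and (y == 0 or y == n - 1) and (z == 0 or z == n - 1):
--         return 0
--     if (
--         ((x == 0 or x == n - 1) and y > 0 and y < n - 1 and z > 0 and z < n - 1)
--         or ((y == 0 or y == n - 1) and x > 0 and x < n - 1 and z > 0 and z < n - 1)
--         or ((z == 0 or z == n - 1) and x > 0 and x < n - 1 and y > 0 and y < n - 1)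
--     ):
--         return 1
--     if x > 0 and x < n - 1 and y > 0 and y < n - 1 and z > 0 and z < n - 1:
--         return -1
--     return 2
--
-- def list_corners(n: int) -> list[tuple[int, int, int]]:
--     """Get a list of coordinates of the corners."""
--     return [
--         (x, y, z)
--         for x in range(n)
--         for y in range(n)
--         for z in range(n)
--         if cubie_type(n, x, y, z) == 0
--     ]
-- ===== SOURCE B (Python) =====
-- def list_corners(n: int) -> list[tuple[int, int, int]]:
--     """Get a list of coordinates of the corners."""
--     if n <= 0:
--         return []
--     axes = [0] if n == 1 else [0, n - 1]
--     return [(x, y, z) for x in axes for y in axes for z in axes]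
-- ===== Notes on version B (the rewrite author's own statement) =====
-- stated objective: faster
-- what changed: B enumerates only the two boundary values of each axis (deduplicated when the cube has a single layer) and takes their 3-fold product, instead of scanning all n^3 cells and classifying each with cubie_type.
import Mathlib
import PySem

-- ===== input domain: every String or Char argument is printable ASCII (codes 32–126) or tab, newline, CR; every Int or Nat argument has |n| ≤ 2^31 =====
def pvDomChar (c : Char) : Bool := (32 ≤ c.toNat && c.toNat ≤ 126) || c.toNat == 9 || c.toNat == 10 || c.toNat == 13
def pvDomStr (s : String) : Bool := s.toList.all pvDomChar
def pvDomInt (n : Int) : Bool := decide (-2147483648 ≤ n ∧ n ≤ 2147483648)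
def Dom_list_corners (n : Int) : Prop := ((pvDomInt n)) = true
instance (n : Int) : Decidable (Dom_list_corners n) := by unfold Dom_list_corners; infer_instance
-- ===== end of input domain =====

-- B takes the 3-fold product of the deduplicated boundary values of an axis instead of scanning the whole cube: a faster algorithm.


-- ===== PORT A =====
def cubie_type (n x y z : Int) : Int :=
  if (x = 0 ∨ x = n - 1) ∧ (y = 0 ∨ y = n - 1) ∧ (z = 0 ∨ z = n - 1) then 0
  else if ((x = 0 ∨ x = n - 1) ∧ 0 < y ∧ y < n - 1 ∧ 0 < z ∧ z < n - 1)
        ∨ ((y = 0 ∨ y = n - 1) ∧ 0 < x ∧ x < n - 1 ∧ 0 < z ∧ z < n - 1)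
        ∨ ((z = 0 ∨ z = n - 1) ∧ 0 < x ∧ x < n - 1 ∧ 0 < y ∧ y < n - 1) then 1
  else if 0 < x ∧ x < n - 1 ∧ 0 < y ∧ y < n - 1 ∧ 0 < z ∧ z < n - 1 then -1
  else 2

def list_corners (n : Int) : List (Int × Int × Int) :=
  (PySem.List.pyRange 0 n 1).flatMap fun x =>
    (PySem.List.pyRange 0 n 1).flatMap fun y =>
      ((PySem.List.pyRange 0 n 1).filter fun z => cubie_type n x y z == 0).map fun z => (x, y, z)

-- ===== PORT B =====
def list_corners_alt (n : Int) : List (Int × Int × Int) :=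
  if n ≤ 0 then []
  else
    let axes : List Int := if n = 1 then [0] else [0, n - 1]
    axes.flatMap fun x => axes.flatMap fun y => axes.map fun z => (x, y, z)

-- ===== PRECONDITION & SPEC =====
def Spec_list_corners (n : Int) (out : List (Int × Int × Int)) : Prop := out = list_corners_alt n
instance (n : Int) (out : List (Int × Int × Int)) : Decidable (Spec_list_corners n out) := by unfold Spec_list_corners; infer_instance

-- ===== CLAIM (what is proved, stated in full; the proofs are below) =====
def Claim_equal_list_corners : Prop := ∀ (n : Int), Dom_list_corners n → Spec_list_corners n (list_corners n)

-- ===== LEMMAS AND PROOFS =====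

theorem cubie_zero_iff (n x y z : Int) :
    (cubie_type n x y z == 0) =
      ((x == 0 || x == n - 1) && (y == 0 || y == n - 1) && (z == 0 || z == n - 1)) := by
  unfold cubie_type
  split_ifs with h1 h2 h3 <;> simp_all

-- flatMap is unchanged by dropping elements whose image is empty
theorem flatMap_filter_nil {α β : Type} (xs : List α) (p : α → Bool) (f : α → List β)
    (h : ∀ x ∈ xs, p x = false → f x = []) :
    xs.flatMap f = (xs.filter p).flatMap f := by
  induction xs with
  | nil => rfl
  | cons a xs ih =>
    have := h a (List.mem_cons_self)
    by_cases hp : p a = true <;>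
      simp_all [List.flatMap_cons,
        fun x hx => h x (List.mem_cons_of_mem a hx)]

theorem filter_range_boundary (n : Int) (hn : 1 ≤ n) :
    ((PySem.List.pyRange 0 n 1).filter fun t => t == 0 || t == n - 1) =
      (if n = 1 then [0] else [0, n - 1]) := by
  by_cases h1 : n = 1
  · subst h1
    rw [PySem.List.pyRange_one_cons (by norm_num), PySem.List.pyRange_one_eq_nil (by norm_num)]
    decide
  · have h2 : (2 : Int) ≤ n := by omega
    rw [PySem.List.pyRange_one_cons (by omega), show (0:Int) + 1 = 1 by norm_num]
    have hsplit : PySem.List.pyRange 1 n 1 = PySem.List.pyRange 1 (n - 1) 1 ++ [n - 1] := by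
      have := PySem.List.pyRange_one_succ_right (a := 1) (b := n - 1) (by omega)
      simpa [show n - 1 + 1 = n by omega] using this
    rw [hsplit]
    have hmid : ∀ t ∈ PySem.List.pyRange 1 (n - 1) 1, ¬((t == 0 || t == n - 1) = true) := by
      intro t ht
      have := (PySem.List.mem_pyRange_one).1 ht
      simp only [Bool.or_eq_true, beq_iff_eq]
      omega
    simp [List.filter_append, List.filter_eq_nil_iff.2 hmid, h1]

theorem list_corners_eq (n : Int) : list_corners n = list_corners_alt n := by
  by_cases hn : n ≤ 0
  · simp [list_corners, list_corners_alt, hn, PySem.List.pyRange_one_eq_nil hn]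
  · have hn1 : (1 : Int) ≤ n := by omega
    set p : Int → Bool := fun t => t == 0 || t == n - 1 with hp
    set axes : List Int := if n = 1 then [0] else [0, n - 1] with haxes
    have hfr : (PySem.List.pyRange 0 n 1).filter p = axes := filter_range_boundary n hn1
    have inner : ∀ x y : Int, p x = true → p y = true →
        (((PySem.List.pyRange 0 n 1).filter fun z => cubie_type n x y z == 0).map
          fun z => (x, y, z)) = axes.map fun z => (x, y, z) := by
      intro x y hx hy
      have : (fun z => cubie_type n x y z == 0) = p := by
        funext z
        simp only [cubie_zero_iff, hp]
        simp only [hp, Bool.or_eq_true, beq_iff_eq] at hx hy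
        simp [hx, hy]
      rw [this, hfr]
    have innerNil : ∀ x y : Int, (p x = false ∨ p y = false) →
        (((PySem.List.pyRange 0 n 1).filter fun z => cubie_type n x y z == 0).map
          fun z => (x, y, z)) = [] := by
      intro x y hxy
      have : ((PySem.List.pyRange 0 n 1).filter fun z => cubie_type n x y z == 0) = [] := by
        apply List.filter_eq_nil_iff.2
        intro z _
        simp only [cubie_zero_iff, hp] at *
        rcases hxy with h | h <;> simp [h]
      simp [this]
    unfold list_corners list_corners_alt
    rw [if_neg hn]
    rw [flatMap_filter_nil (PySem.List.pyRange 0 n 1) p _ (by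
      intro x _ hx
      have : ∀ y : Int, (((PySem.List.pyRange 0 n 1).filter fun z => cubie_type n x y z == 0).map
          fun z => (x, y, z)) = [] := fun y => innerNil x y (Or.inl hx)
      simp [this])]
    rw [hfr]
    have mem_axes : ∀ t ∈ axes, p t = true := by
      intro t ht
      rw [haxes] at ht
      split_ifs at ht <;> simp_all
    refine List.flatMap_congr ?_
    intro x hx
    rw [flatMap_filter_nil (PySem.List.pyRange 0 n 1) p _
      (fun y _ hy => innerNil x y (Or.inr hy)), hfr]
    exact List.flatMap_congr fun y hy => inner x y (mem_axes x hx) (mem_axes y hy)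

-- ===== VERDICT (by name: the statement is the Claim_ definition above) =====
theorem list_corners_spec : Claim_equal_list_corners := by
  intro n _
  exact list_corners_eq n
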